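-- pv_equiv track=rewrite | github.com/Ruslan515/toxic_test | utils.py | get_list_of_special_characters
-- ===== SOURCE A (Python) =====
-- def get_list_of_special_characters(not_lemmatized_texts):
--   result = set()
--   punct = {"!", '"', "'", ')', ')', ',', '-', '.', ':', ';', '?', '`'}
--   for text in not_lemmatized_texts:
--     result.update(set(text))
--   for character in result.copy():
--     if sum([character.isalpha(), character.isspace(), character.isdigit(), (character in punct)]) == 1:
--       result.discard(character)
--   return result
-- ===== SOURCE B (Python) =====
-- def get_list_of_special_characters(not_lemmatized_texts):
--   punct = {"!", '"', "'", ')', ')', ',', '-', '.', ':', ';', '?', '`'}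
--   return {c for text in not_lemmatized_texts for c in text
--           if not (c.isalpha() or c.isspace() or c.isdigit() or c in punct)}
-- ===== Notes on version B (the rewrite author's own statement) =====
-- stated objective: simpler
-- what changed: B replaces A's two passes (collect every distinct character into a set, then iterate over a copy discarding alpha/space/digit/punct ones) with a single set comprehension that filters each character during collection; valid because the four discard predicates are mutually exclusive, so A's sum(...)==1 test equals any of them holding.
import Mathlib
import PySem

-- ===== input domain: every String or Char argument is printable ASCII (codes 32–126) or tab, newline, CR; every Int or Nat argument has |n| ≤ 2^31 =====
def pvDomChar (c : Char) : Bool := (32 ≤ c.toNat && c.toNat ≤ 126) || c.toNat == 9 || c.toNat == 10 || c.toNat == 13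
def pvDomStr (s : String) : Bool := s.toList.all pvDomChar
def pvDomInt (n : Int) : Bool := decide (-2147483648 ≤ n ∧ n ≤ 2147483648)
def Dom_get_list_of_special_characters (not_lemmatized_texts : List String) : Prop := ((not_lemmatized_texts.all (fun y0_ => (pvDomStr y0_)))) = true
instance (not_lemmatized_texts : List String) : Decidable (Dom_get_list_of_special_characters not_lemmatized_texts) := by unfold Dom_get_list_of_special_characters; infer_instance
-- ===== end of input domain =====

-- One-pass filter-while-collecting (B) instead of A's collect-all-then-discard; same cost, simpler.
-- A's second loop iterates over a copy of a Python set (hash order); its result is order-independent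
-- (a filter), so iterating in first-insertion order is an exact port.

-- ===== PORT A =====
-- the punct set literal shared verbatim by both Pythons (')' appears twice in the source literal)
def pvPunct : PySem.Set String :=
  PySem.Set.ofList ["!", "\"", "'", ")", ")", ",", "-", ".", ":", ";", "?", "`"]

def get_list_of_special_characters (not_lemmatized_texts : List String) : List String :=
  let result : PySem.Set String :=
    not_lemmatized_texts.foldl
      (fun r text =>
        PySem.Set.union r (PySem.Set.ofList (text.toList.map (fun c => String.mk [c]))))
      PySem.Set.empty
  result.foldl
    (fun r ch =>
      if ([if PySem.Str.strIsalpha ch then 1 else 0, if PySem.Str.strIsspace ch then 1 else 0,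
           if PySem.Str.strIsdigit ch then 1 else 0,
           if PySem.Set.contains pvPunct ch then 1 else 0].sum : Nat) == 1
      then PySem.Set.discard r ch else r)
    result

-- ===== PORT B =====
def get_list_of_special_characters_alt (not_lemmatized_texts : List String) : List String :=
  PySem.Set.ofList
    ((not_lemmatized_texts.flatMap (fun text => text.toList.map (fun c => String.mk [c]))).filter
      (fun ch => !(PySem.Str.strIsalpha ch || PySem.Str.strIsspace ch || PySem.Str.strIsdigit ch
                   || PySem.Set.contains pvPunct ch)))

-- ===== PRECONDITION & SPEC =====
def Spec_get_list_of_special_characters (not_lemmatized_texts : List String) (out : List String) : Prop := out = get_list_of_special_characters_alt not_lemmatized_texts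
instance (not_lemmatized_texts : List String) (out : List String) : Decidable (Spec_get_list_of_special_characters not_lemmatized_texts out) := by unfold Spec_get_list_of_special_characters; infer_instance

-- ===== CLAIM (what is proved, stated in full; the proofs are below) =====
def Claim_equal_get_list_of_special_characters : Prop := ∀ (not_lemmatized_texts : List String), Dom_get_list_of_special_characters not_lemmatized_texts → Spec_get_list_of_special_characters not_lemmatized_texts (get_list_of_special_characters not_lemmatized_texts)

-- ===== LEMMAS AND PROOFS =====

theorem pv_update_singleton {α : Type} [BEq α] (s : PySem.Set α) (x : α) :
    PySem.Set.update s [x] = PySem.Set.add s x := rfl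

-- adding an already-deduplicated list adds the same elements
theorem pv_update_ofList {α : Type} [BEq α] [LawfulBEq α] (s : PySem.Set α) (xs : List α) :
    PySem.Set.update s (PySem.Set.ofList xs) = PySem.Set.update s xs := by
  induction xs using List.reverseRecOn with
  | nil => rfl
  | append_singleton xs x ih =>
    rw [PySem.Set.ofList_append, pv_update_singleton, PySem.Set.update_append,
      pv_update_singleton]
    by_cases h : x ∈ PySem.Set.ofList xs
    · have hc : (PySem.Set.ofList xs).contains x = true := by simp [h]
      rw [show PySem.Set.add (PySem.Set.ofList xs) x = PySem.Set.ofList xs from by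
        rw [PySem.Set.add, if_pos hc], ih]
      have hm : x ∈ PySem.Set.update s xs :=
        (PySem.Set.mem_update s xs x).mpr (Or.inr ((PySem.Set.mem_ofList xs x).mp h))
      have hc2 : (PySem.Set.update s xs).contains x = true := by simp [hm]
      rw [PySem.Set.add, if_pos hc2]
    · have hxxs : x ∉ xs := fun hm => h ((PySem.Set.mem_ofList xs x).mpr hm)
      rw [show PySem.Set.add (PySem.Set.ofList xs) x = PySem.Set.ofList xs ++ [x] from by
        rw [PySem.Set.add, if_neg (by simp [hxxs])], PySem.Set.update_append, ih,
        pv_update_singleton]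

-- A's first loop builds set(concatenation of all texts' characters)
theorem pv_first_loop (chars : String → List String) (ts : List String) (s : PySem.Set String) :
    ts.foldl (fun r text => PySem.Set.union r (PySem.Set.ofList (chars text))) s
      = PySem.Set.update s (ts.flatMap chars) := by
  induction ts generalizing s with
  | nil => simp [PySem.Set.update]
  | cons t ts ih =>
    simp only [List.foldl_cons, List.flatMap_cons, ih]
    rw [PySem.Set.union, pv_update_ofList, PySem.Set.update_append]

-- A's second loop over any iteration list is a filter
theorem pv_second_loop (p : String → Bool) (iter : List String) (s : List String) :
    iter.foldl (fun r ch => if p ch then PySem.Set.discard r ch else r) s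
      = s.filter (fun y => !(p y && iter.contains y)) := by
  induction iter generalizing s with
  | nil => simp
  | cons x xs ih =>
    simp only [List.foldl_cons]
    by_cases hx : p x = true
    · rw [if_pos hx, ih, PySem.Set.discard, List.filter_filter]
      apply List.filter_congr
      intro y _
      by_cases hyx : y = x
      · simp [hyx, hx]
      · simp [hyx]
    · rw [if_neg hx, ih]
      apply List.filter_congr
      intro y _
      by_cases hyx : y = x
      · simp [hyx, hx]
      · simp [hyx]

-- dedup (set-of-list) commutes with filter
theorem pv_ofList_filter (q : String → Bool) (l : List String) :
    (PySem.Set.ofList l).filter q = PySem.Set.ofList (l.filter q) := by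
  induction l using List.reverseRecOn with
  | nil => rfl
  | append_singleton l x ih =>
    rw [PySem.Set.ofList_append, pv_update_singleton]
    by_cases h : x ∈ PySem.Set.ofList l
    · have hc : (PySem.Set.ofList l).contains x = true := by simp [h]
      rw [PySem.Set.add, if_pos hc, ih, List.filter_append]
      by_cases hq : q x = true
      · have hxl : x ∈ l := (PySem.Set.mem_ofList l x).mp h
        have hxf : x ∈ l.filter q := List.mem_filter.mpr ⟨hxl, hq⟩
        have hcf : (PySem.Set.ofList (l.filter q)).contains x = true := by
          simp [(PySem.Set.mem_ofList (l.filter q) x).mpr hxf]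
        rw [show l.filter q ++ List.filter q [x] = l.filter q ++ [x] from by simp [hq],
          PySem.Set.ofList_append, pv_update_singleton, PySem.Set.add, if_pos hcf]
      · simp [hq]
    · have hxl : x ∉ l := fun hm => h ((PySem.Set.mem_ofList l x).mpr hm)
      rw [PySem.Set.add, if_neg (by simp [hxl]), List.filter_append, ih, List.filter_append]
      by_cases hq : q x = true
      · rw [show List.filter q [x] = [x] from by simp [hq], PySem.Set.ofList_append,
          pv_update_singleton, PySem.Set.add, if_neg (by simp [hxl])]
      · simp [hq]

-- character-class disjointness (universal over Char)
theorem pv_alpha_space (c : Char) : (PySem.Chars.isalpha c && PySem.Chars.isspace c) = false := by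
  simp only [PySem.Chars.isalpha, PySem.Chars.isspace, PySem.Chars.isupper, PySem.Chars.islower,
    Char.le_def, UInt32.le_iff_toNat_le, Char.toNat, Bool.and_eq_false_imp, Bool.or_eq_true,
    Bool.and_eq_true, decide_eq_true_eq, Bool.or_eq_false_iff, decide_eq_false_iff_not, not_le,
    Char.reduceVal, UInt32.reduceToNat]
  omega

theorem pv_alpha_digit (c : Char) : (PySem.Chars.isalpha c && PySem.Chars.isdigit c) = false := by
  simp only [PySem.Chars.isalpha, PySem.Chars.isdigit, PySem.Chars.isupper, PySem.Chars.islower,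
    Char.le_def, UInt32.le_iff_toNat_le, Bool.and_eq_false_imp, Bool.or_eq_true,
    Bool.and_eq_true, decide_eq_true_eq, decide_eq_false_iff_not, not_le,
    Char.reduceVal, UInt32.reduceToNat]
  omega

theorem pv_space_digit (c : Char) : (PySem.Chars.isspace c && PySem.Chars.isdigit c) = false := by
  simp only [PySem.Chars.isspace, PySem.Chars.isdigit, Char.le_def, UInt32.le_iff_toNat_le,
    Char.toNat, Bool.and_eq_false_imp, Bool.or_eq_true, Bool.and_eq_true, decide_eq_true_eq,
    decide_eq_false_iff_not, not_le, Char.reduceVal, UInt32.reduceToNat]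
  omega

-- a ''nonempty and all f''-style test for two pointwise-disjoint char classes is never true twice
theorem pv_all_disj (f g : Char → Bool) (hfg : ∀ c, (f c && g c) = false) (cs : List Char) :
    ((!cs.isEmpty && cs.all f) && (!cs.isEmpty && cs.all g)) = false := by
  cases cs with
  | nil => rfl
  | cons c cs =>
    have h := hfg c
    cases hf : f c <;> cases hg : g c <;> simp_all

theorem pv_str_alpha_space (s : String) :
    (PySem.Str.strIsalpha s && PySem.Str.strIsspace s) = false := by
  rw [PySem.Str.strIsalpha, PySem.Str.strIsspace, PySem.Chars.strIsalpha, PySem.Chars.strIsspace]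
  exact pv_all_disj _ _ pv_alpha_space s.toList

theorem pv_str_alpha_digit (s : String) :
    (PySem.Str.strIsalpha s && PySem.Str.strIsdigit s) = false := by
  rw [PySem.Str.strIsalpha, PySem.Str.strIsdigit, PySem.Chars.strIsalpha, PySem.Chars.strIsdigit]
  exact pv_all_disj _ _ pv_alpha_digit s.toList

theorem pv_str_space_digit (s : String) :
    (PySem.Str.strIsspace s && PySem.Str.strIsdigit s) = false := by
  rw [PySem.Str.strIsspace, PySem.Str.strIsdigit, PySem.Chars.strIsspace, PySem.Chars.strIsdigit]
  exact pv_all_disj _ _ pv_space_digit s.toList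

-- the sum==1 test equals the disjunction (the four predicates are mutually exclusive)
theorem pv_pred_eq (ch : String) :
    (([if PySem.Str.strIsalpha ch then 1 else 0, if PySem.Str.strIsspace ch then 1 else 0,
       if PySem.Str.strIsdigit ch then 1 else 0,
       if PySem.Set.contains pvPunct ch then 1 else 0].sum : Nat) == 1)
      = (PySem.Str.strIsalpha ch || PySem.Str.strIsspace ch || PySem.Str.strIsdigit ch
         || PySem.Set.contains pvPunct ch) := by
  by_cases hp : PySem.Set.contains pvPunct ch = true
  · have hmem : ch ∈ (["!", "\"", "'", ")", ",", "-", ".", ":", ";", "?", "`"] : List String) := by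
      have : ch ∈ pvPunct := by simpa using hp
      simpa [pvPunct, PySem.Set.ofList, PySem.Set.add, PySem.Set.contains] using this
    fin_cases hmem <;> simp [PySem.Set.contains] <;> decide
  · have h1 := pv_str_alpha_space ch
    have h2 := pv_str_alpha_digit ch
    have h3 := pv_str_space_digit ch
    cases ha : PySem.Str.strIsalpha ch <;> cases hb : PySem.Str.strIsspace ch <;>
      cases hc : PySem.Str.strIsdigit ch <;> simp_all

-- ===== VERDICT (by name: the statement is the Claim_ definition above) =====
theorem get_list_of_special_characters_spec : Claim_equal_get_list_of_special_characters := by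
  intro ts _
  unfold Spec_get_list_of_special_characters
  unfold get_list_of_special_characters get_list_of_special_characters_alt
  rw [pv_first_loop]
  set l := ts.flatMap (fun text => text.toList.map (fun c => String.mk [c])) with hl
  have hbase : PySem.Set.update PySem.Set.empty l = PySem.Set.ofList l := rfl
  rw [hbase, pv_second_loop]
  have hcong : (PySem.Set.ofList l).filter
      (fun y => !(([if PySem.Str.strIsalpha y then 1 else 0,
        if PySem.Str.strIsspace y then 1 else 0, if PySem.Str.strIsdigit y then 1 else 0,
        if PySem.Set.contains pvPunct y then 1 else 0].sum : Nat) == 1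
          && List.contains (PySem.Set.ofList l) y))
      = (PySem.Set.ofList l).filter
      (fun ch => !(PySem.Str.strIsalpha ch || PySem.Str.strIsspace ch || PySem.Str.strIsdigit ch
          || PySem.Set.contains pvPunct ch)) := by
    apply List.filter_congr
    intro y hy
    have hcy : List.contains (PySem.Set.ofList l) y = true := by simp [hy]
    rw [pv_pred_eq, hcy, Bool.and_true]
  rw [hcong, pv_ofList_filter]
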